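-- pv_equiv track=rewrite | github.com/RonvanderPlas/aoc2025 | Day3/python/day3_part1.py | find_highest_digit
-- ===== SOURCE A (Python) =====
-- def find_highest_digit(string, start_index, stop_index):
--     highest_digit = -1
--     highest_digit_index = -1
--     for i in range(start_index, stop_index):
--         digit = int(string[i])
--         if digit > highest_digit:
--             highest_digit = digit
--             highest_digit_index = i
--     return highest_digit, highest_digit_index
-- ===== SOURCE B (Python) =====
-- def find_highest_digit(string, start_index, stop_index):
--     if start_index >= stop_index:
--         return (-1, -1)
--     highest = max(int(string[i]) for i in range(start_index, stop_index))
--     for i in range(start_index, stop_index):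
--         if int(string[i]) == highest:
--             return (highest, i)
-- ===== Notes on version B (the rewrite author's own statement) =====
-- stated objective: alternative
-- what changed: A's single fused max+argmax loop with a running (-1,-1) sentinel state is replaced by a guard for the empty range plus two stateless passes: a max() over the range, then a scan for the first index attaining that max.
import Mathlib
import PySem

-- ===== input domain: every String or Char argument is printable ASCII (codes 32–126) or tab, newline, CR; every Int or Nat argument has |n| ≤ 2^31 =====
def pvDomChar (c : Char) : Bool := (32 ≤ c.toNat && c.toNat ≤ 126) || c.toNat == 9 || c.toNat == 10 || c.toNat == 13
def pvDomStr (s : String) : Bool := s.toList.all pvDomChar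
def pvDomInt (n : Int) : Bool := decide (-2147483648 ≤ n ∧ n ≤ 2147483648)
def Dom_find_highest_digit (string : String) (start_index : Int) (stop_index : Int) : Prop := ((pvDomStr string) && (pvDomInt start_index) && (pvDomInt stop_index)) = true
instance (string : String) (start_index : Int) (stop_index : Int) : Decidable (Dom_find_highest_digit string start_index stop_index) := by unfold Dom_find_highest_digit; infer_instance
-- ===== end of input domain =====

-- B replaces A's fused max+argmax loop (sentinel state) by an empty-range guard,
-- a max() pass and a first-match scan; objective: alternative decomposition, same cost.

-- ===== PORT A =====
-- A's single pass: for i in range(start, stop): d = int(string[i]); update running (max, index).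
-- int(string[i]) for the digit chars admitted by Pre_ is the code-point value minus 48; on an
-- invalid index / non-digit char Python raises (excluded by Pre_), the port keeps the state.
def find_highest_digit (string : String) (start_index : Int) (stop_index : Int) : Int × Int :=
  (PySem.List.pyRange start_index stop_index 1).foldl
    (fun st i =>
      match PySem.Str.pyGet? string i with
      | some c => let digit : Int := (c.toNat : Int) - 48
                  if digit > st.1 then (digit, i) else st
      | none => st)
    (-1, -1)

-- ===== PORT B =====
-- int(string[i]) of Source B, exact on the digit chars Pre_ admits; -1 is a totalizing default
-- for the raising cases Pre_ excludes.
def pvDigitAt (string : String) (i : Int) : Int :=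
  match PySem.Str.pyGet? string i with
  | some c => (c.toNat : Int) - 48
  | none => -1

def find_highest_digit_alt (string : String) (start_index : Int) (stop_index : Int) : Int × Int :=
  if start_index ≥ stop_index then (-1, -1)
  else
    let idxs := PySem.List.pyRange start_index stop_index 1
    match PySem.List.max? (idxs.map (pvDigitAt string)) (fun x => x) with
    | none => (-1, -1)  -- unreachable: the range is nonempty
    | some highest =>
      match idxs.find? (fun i => pvDigitAt string i == highest) with
      | some i => (highest, i)
      | none => (-1, -1)  -- unreachable: the max is attained

-- ===== PRECONDITION & SPEC =====
-- Pre_: the range is empty, or it lies inside the string's valid (possibly negative) index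
-- window and every character it touches is a decimal digit — exactly where int(string[i])
-- does not raise. (The bound check comes first so the condition evaluates without
-- materialising a huge range.)
def pvPreB (string : String) (start_index : Int) (stop_index : Int) : Bool :=
  decide (start_index ≥ stop_index) ||
    (decide (-(string.length : Int) ≤ start_index) &&
     decide (stop_index ≤ (string.length : Int)) &&
     (PySem.List.pyRange start_index stop_index 1).all
       (fun i => ((PySem.Str.pyGet? string i).map Char.isDigit).getD false))

def Pre_find_highest_digit (string : String) (start_index : Int) (stop_index : Int) : Prop :=
  pvPreB string start_index stop_index = true
instance (string : String) (start_index : Int) (stop_index : Int) : Decidable (Pre_find_highest_digit string start_index stop_index) := by unfold Pre_find_highest_digit; infer_instance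

def pvWitness_find_highest_digit : String × Int × Int := ("19293", 0, 5)

def Spec_find_highest_digit (string : String) (start_index : Int) (stop_index : Int) (out : Int × Int) : Prop := out = find_highest_digit_alt string start_index stop_index
instance (string : String) (start_index : Int) (stop_index : Int) (out : Int × Int) : Decidable (Spec_find_highest_digit string start_index stop_index out) := by unfold Spec_find_highest_digit; infer_instance

-- ===== CLAIM (what is proved, stated in full; the proofs are below) =====
def Claim_equal_find_highest_digit : Prop := ∀ (string : String) (start_index : Int) (stop_index : Int), Dom_find_highest_digit string start_index stop_index → Pre_find_highest_digit string start_index stop_index → Spec_find_highest_digit string start_index stop_index (find_highest_digit string start_index stop_index)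

-- ===== LEMMAS AND PROOFS =====

-- Pre_ gives the pointwise fact the equivalence proof uses
theorem pre_pointwise (string : String) (a b : Int) (h : pvPreB string a b = true) :
    ∀ i ∈ PySem.List.pyRange a b 1,
      ((PySem.Str.pyGet? string i).map Char.isDigit).getD false = true := by
  intro i hi
  unfold pvPreB at h
  rw [Bool.or_eq_true] at h
  rcases h with h | h
  · exfalso
    rw [PySem.List.mem_pyRange_one] at hi
    simp only [decide_eq_true_eq] at h
    omega
  · rw [Bool.and_eq_true, Bool.and_eq_true] at h
    exact List.all_eq_true.mp h.2 i hi

-- A's loop body, written through pvDigitAt (valid whenever the index is in range, and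
-- literally equal to the port's body under Pre_, see step_eq below).
def pvStep (string : String) (st : Int × Int) (i : Int) : Int × Int :=
  if pvDigitAt string i > st.1 then (pvDigitAt string i, i) else st

theorem step_eq (string : String) (st : Int × Int) (i : Int)
    (h : ((PySem.Str.pyGet? string i).map Char.isDigit).getD false = true) :
    (match PySem.Str.pyGet? string i with
      | some c => let digit : Int := (c.toNat : Int) - 48
                  if digit > st.1 then (digit, i) else st
      | none => st) = pvStep string st i := by
  unfold pvStep pvDigitAt
  cases hg : PySem.Str.pyGet? string i with
  | none =>
    have hg' : PySem.List.pyGet? string.toList i = none := by simpa using hg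
    simp [hg'] at h
  | some c => simp

theorem find_cons_neg {p : Int → Bool} {x : Int} {xs : List Int} (h : ¬ p x = true) :
    List.find? p (x :: xs) = List.find? p xs := by
  simp only [List.find?, Bool.not_eq_true] at *; rw [h]

theorem find_cons_pos {p : Int → Bool} {x : Int} {xs : List Int} (h : p x = true) :
    List.find? p (x :: xs) = some x := by
  simp only [List.find?]; rw [h]

-- first component of A's fold = running max
theorem fold_fst (string : String) (l : List Int) :
    ∀ (m j : Int), (l.foldl (pvStep string) (m, j)).1 = (l.map (pvDigitAt string)).foldl max m := by
  induction l with
  | nil => intro m j; simp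
  | cons x xs ih =>
    intro m j
    simp only [List.foldl_cons, List.map_cons, pvStep]
    by_cases h : pvDigitAt string x > m
    · simp only [if_pos h, ih]
      have : max m (pvDigitAt string x) = pvDigitAt string x := by omega
      rw [this]
    · simp only [if_neg h, ih]
      have : max m (pvDigitAt string x) = m := by omega
      rw [this]

-- if nothing in l exceeds m, the fold never updates
theorem fold_noupdate (string : String) (l : List Int) :
    ∀ (m j : Int), (∀ i ∈ l, pvDigitAt string i ≤ m) →
      l.foldl (pvStep string) (m, j) = (m, j) := by
  induction l with
  | nil => intro m j _; simp
  | cons x xs ih =>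
    intro m j h
    simp only [List.foldl_cons, pvStep]
    have hx : ¬ pvDigitAt string x > m := by
      have := h x (by simp); omega
    rw [if_neg hx]
    exact ih m j (fun i hi => h i (by simp [hi]))

-- second component of A's fold = first index attaining the overall max (when it improves on m)
theorem fold_snd (string : String) (l : List Int) :
    ∀ (m j : Int), (l.map (pvDigitAt string)).foldl max m > m →
      l.find? (fun i => pvDigitAt string i == (l.map (pvDigitAt string)).foldl max m)
        = some (l.foldl (pvStep string) (m, j)).2 := by
  induction l with
  | nil => intro m j h; simp at h
  | cons x xs ih =>
    intro m j h
    simp only [List.map_cons, List.foldl_cons] at h ⊢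
    simp only [pvStep]
    by_cases hx : pvDigitAt string x > m
    · rw [if_pos hx]
      have hmax : max m (pvDigitAt string x) = pvDigitAt string x := by omega
      rw [hmax] at h ⊢
      by_cases himp : (xs.map (pvDigitAt string)).foldl max (pvDigitAt string x) > pvDigitAt string x
      · -- the max lies strictly beyond x: x is skipped by find?, recurse
        have hne : ¬ (pvDigitAt string x == (xs.map (pvDigitAt string)).foldl max (pvDigitAt string x)) = true := by
          simp; omega
        rw [find_cons_neg (p := fun i => pvDigitAt string i == (xs.map (pvDigitAt string)).foldl max (pvDigitAt string x)) hne]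
        exact ih (pvDigitAt string x) x himp
      · -- x already attains the max: the fold never updates again, find? stops at x
        have hle : ∀ i ∈ xs, pvDigitAt string i ≤ pvDigitAt string x := by
          intro i hi
          have h1 : pvDigitAt string i ≤ (xs.map (pvDigitAt string)).foldl max (pvDigitAt string x) :=
            (PySem.List.le_foldl_max _ _).2 _ (List.mem_map_of_mem hi)
          omega
        have heq : (xs.map (pvDigitAt string)).foldl max (pvDigitAt string x) = pvDigitAt string x := by
          have h2 : pvDigitAt string x ≤ (xs.map (pvDigitAt string)).foldl max (pvDigitAt string x) :=
            (PySem.List.le_foldl_max _ _).1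
          omega
        rw [heq]
        rw [find_cons_pos (p := fun i => pvDigitAt string i == pvDigitAt string x) (by simp)]
        rw [fold_noupdate string xs (pvDigitAt string x) x hle]
    · rw [if_neg hx]
      have hmax : max m (pvDigitAt string x) = m := by omega
      rw [hmax] at h ⊢
      have hne : ¬ (pvDigitAt string x == (xs.map (pvDigitAt string)).foldl max m) = true := by
        simp; omega
      rw [find_cons_neg (p := fun i => pvDigitAt string i == (xs.map (pvDigitAt string)).foldl max m) hne]
      exact ih m j h

-- under Pre_, A's literal fold body is pvStep
theorem fold_body_eq (string : String) (l : List Int)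
    (hpre : ∀ i ∈ l, ((PySem.Str.pyGet? string i).map Char.isDigit).getD false = true) :
    ∀ (st : Int × Int),
    l.foldl
      (fun st i =>
        match PySem.Str.pyGet? string i with
        | some c => let digit : Int := (c.toNat : Int) - 48
                    if digit > st.1 then (digit, i) else st
        | none => st) st
    = l.foldl (pvStep string) st := by
  induction l with
  | nil => intro st; rfl
  | cons x xs ih =>
    intro st
    simp only [List.foldl_cons]
    rw [step_eq string st x (hpre x (by simp))]
    exact ih (fun i hi => hpre i (by simp [hi])) _

-- a digit char gives a value ≥ 0
theorem digit_nonneg (string : String) (i : Int)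
    (h : ((PySem.Str.pyGet? string i).map Char.isDigit).getD false = true) :
    0 ≤ pvDigitAt string i := by
  unfold pvDigitAt
  cases hg : PySem.Str.pyGet? string i with
  | none =>
    have hg' : PySem.List.pyGet? string.toList i = none := by simpa using hg
    simp [hg'] at h
  | some c =>
    have hg' : PySem.List.pyGet? string.toList i = some c := by simpa using hg
    have hc : c.isDigit = true := by simpa [hg'] using h
    have h48 : 48 ≤ c.toNat ∧ c.toNat ≤ 57 := by
      simpa [Char.isDigit, Char.le_def] using hc
    show (0 : Int) ≤ (c.toNat : Int) - 48
    omega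

-- ===== VERDICT (by name: the statement is the Claim_ definition above) =====
theorem find_highest_digit_spec : Claim_equal_find_highest_digit := by
  intro s a b _ hpre0
  have hpre := pre_pointwise s a b hpre0
  unfold Spec_find_highest_digit find_highest_digit find_highest_digit_alt
  rw [fold_body_eq s _ hpre]
  by_cases hab : a ≥ b
  · rw [if_pos hab]
    have : PySem.List.pyRange a b 1 = [] := by
      rw [PySem.List.pyRange_one]
      have : (b - a).toNat = 0 := by omega
      simp [this]
    rw [this]
    rfl
  · rw [if_neg hab]
    -- nonempty range
    have hlt : a < b := by omega
    obtain ⟨x, xs, hcons⟩ : ∃ x xs, PySem.List.pyRange a b 1 = x :: xs := by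
      cases hl : PySem.List.pyRange a b 1 with
      | nil =>
        have : a ∈ PySem.List.pyRange a b 1 := by
          rw [PySem.List.mem_pyRange_one]; omega
        rw [hl] at this; simp at this
      | cons x xs => exact ⟨x, xs, rfl⟩
    rw [hcons]
    simp only [List.map_cons, PySem.List.max?_id_cons]
    have hM : (x :: xs).foldl (pvStep s) (-1, -1) =
        ((xs.map (pvDigitAt s)).foldl max (pvDigitAt s x),
         ((x :: xs).foldl (pvStep s) (-1, -1)).2) := by
      have h1 := fold_fst s (x :: xs) (-1) (-1)
      simp only [List.map_cons, List.foldl_cons] at h1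
      have hx0 : 0 ≤ pvDigitAt s x := by
        apply digit_nonneg
        apply hpre
        rw [hcons]; simp
      have : max (-1 : Int) (pvDigitAt s x) = pvDigitAt s x := by omega
      rw [this] at h1
      exact Prod.ext h1 rfl
    have himp : ((x :: xs).map (pvDigitAt s)).foldl max (-1) > -1 := by
      simp only [List.map_cons, List.foldl_cons]
      have hx0 : 0 ≤ pvDigitAt s x := by
        apply digit_nonneg; apply hpre; rw [hcons]; simp
      have hmx : max (-1 : Int) (pvDigitAt s x) = pvDigitAt s x := by omega
      rw [hmx]
      have h2 : pvDigitAt s x ≤ (xs.map (pvDigitAt s)).foldl max (pvDigitAt s x) :=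
        (PySem.List.le_foldl_max _ _).1
      omega
    have hfind := fold_snd s (x :: xs) (-1) (-1) himp
    have hMeq : ((x :: xs).map (pvDigitAt s)).foldl max (-1)
        = (xs.map (pvDigitAt s)).foldl max (pvDigitAt s x) := by
      simp only [List.map_cons, List.foldl_cons]
      have hx0 : 0 ≤ pvDigitAt s x := by
        apply digit_nonneg; apply hpre; rw [hcons]; simp
      have : max (-1 : Int) (pvDigitAt s x) = pvDigitAt s x := by omega
      rw [this]
    rw [hMeq] at hfind
    rw [hfind]
    conv_lhs => rw [hM]
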